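-- pv_equiv track=rewrite | github.com/Rahib-Khan/OCR | Digitize.py | create_column_definitions
-- ===== SOURCE A (Python) =====
-- from typing import List, Dict, Tuple
--
-- def create_column_definitions(column_lines: List[int], padding: int = 60) -> List[Tuple[str, int, int]]:
--     """
--     Create column definitions from detected column lines.
--
--     Args:
--         column_lines: List of x-positions for column separators
--         padding: Padding added during preprocessing
--
--     Returns:
--         List of tuples: (column_name, x_min, x_max)
--     """
--     if not column_lines:
--         # If no columns detected, return single wide column
--         return [('Column_0', 0, 10000)]
--
--     # Adjust for padding
--     adjusted_lines = [x + padding for x in column_lines]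
--
--     col_definitions = []
--
--     # First column: from 0 to first line
--     col_definitions.append(('Column_0', 0, adjusted_lines[0]))
--
--     # Middle columns: between consecutive lines
--     for i in range(len(adjusted_lines) - 1):
--         col_name = f'Column_{i+1}'
--         col_definitions.append((col_name, adjusted_lines[i], adjusted_lines[i+1]))
--
--     # Last column: from last line to infinity
--     col_name = f'Column_{len(adjusted_lines)}'
--     col_definitions.append((col_name, adjusted_lines[-1], 10000))
--
--     return col_definitions
-- ===== SOURCE B (Python) =====
-- from typing import List, Tuple
--
-- def create_column_definitions(column_lines: List[int], padding: int = 60) -> List[Tuple[str, int, int]]: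
--     # Single stateful pass: carry the previous boundary (starting at 0) through the
--     # separators and close the final open-ended column at 10000.  No adjusted-lines
--     # list, no indexing, no first/middle/last case split; subsumes the empty input.
--     cols = []
--     prev = 0
--     i = 0
--     for x in column_lines:
--         cols.append((f'Column_{i}', prev, x + padding))
--         prev = x + padding
--         i += 1
--     cols.append((f'Column_{i}', prev, 10000))
--     return cols
-- ===== Notes on version B (the rewrite author's own statement) =====
-- stated objective: simpler
-- what changed: Replaces A's staged construction (materialize an adjusted-lines list, then three separate segments: explicit first column, an index loop over consecutive positions, explicit last column, plus an empty-input guard) with one stateful pass that carries the previous boundary through the separators, never indexes a list, and needs no case split at all.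
import Mathlib
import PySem

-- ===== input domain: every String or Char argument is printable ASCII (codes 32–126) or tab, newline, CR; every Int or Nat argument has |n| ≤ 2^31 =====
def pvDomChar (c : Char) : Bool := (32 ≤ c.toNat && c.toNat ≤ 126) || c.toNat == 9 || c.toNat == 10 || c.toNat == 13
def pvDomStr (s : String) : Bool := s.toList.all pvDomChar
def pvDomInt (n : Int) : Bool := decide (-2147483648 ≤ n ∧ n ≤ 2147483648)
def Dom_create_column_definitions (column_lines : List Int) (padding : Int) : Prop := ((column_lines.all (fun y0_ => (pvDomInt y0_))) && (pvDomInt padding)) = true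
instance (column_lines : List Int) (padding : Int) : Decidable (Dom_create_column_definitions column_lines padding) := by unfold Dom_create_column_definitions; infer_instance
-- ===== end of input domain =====

-- B is a single stateful pass carrying the previous boundary through the separators
-- (no adjusted-lines list, no indexing, no first/middle/last case split): simpler decomposition.

-- ===== PORT A =====
def create_column_definitions (column_lines : List Int) (padding : Int) : List (String × Int × Int) :=
  if column_lines = [] then
    [("Column_0", 0, 10000)]
  else
    let adjusted_lines := column_lines.map (fun x => x + padding)
    let col_definitions : List (String × Int × Int) :=
      [("Column_0", 0, PySem.List.pyGetD adjusted_lines 0 0)]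
    let col_definitions :=
      (PySem.List.pyRange 0 ((adjusted_lines.length : Int) - 1) 1).foldl
        (fun acc i =>
          acc ++ [("Column_" ++ PySem.Int.toStr (i + 1),
                   PySem.List.pyGetD adjusted_lines i 0,
                   PySem.List.pyGetD adjusted_lines (i + 1) 0)])
        col_definitions
    col_definitions ++ [("Column_" ++ PySem.Int.toStr (adjusted_lines.length : Int),
                         PySem.List.pyGetD adjusted_lines (-1) 0, 10000)]

-- ===== PORT B =====
def create_column_definitions_alt (column_lines : List Int) (padding : Int) : List (String × Int × Int) :=
  let s := column_lines.foldl
    (fun (st : List (String × Int × Int) × Int × Int) x =>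
      (st.1 ++ [("Column_" ++ PySem.Int.toStr st.2.2, st.2.1, x + padding)],
       x + padding, st.2.2 + 1))
    ([], 0, 0)
  s.1 ++ [("Column_" ++ PySem.Int.toStr s.2.2, s.2.1, 10000)]

-- ===== PRECONDITION & SPEC =====
def Spec_create_column_definitions (column_lines : List Int) (padding : Int) (out : List (String × Int × Int)) : Prop := out = create_column_definitions_alt column_lines padding
instance (column_lines : List Int) (padding : Int) (out : List (String × Int × Int)) : Decidable (Spec_create_column_definitions column_lines padding out) := by unfold Spec_create_column_definitions; infer_instance

-- ===== CLAIM (what is proved, stated in full; the proofs are below) =====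
def Claim_equal_create_column_definitions : Prop := ∀ (column_lines : List Int) (padding : Int), Dom_create_column_definitions column_lines padding → Spec_create_column_definitions column_lines padding (create_column_definitions column_lines padding)

-- ===== LEMMAS AND PROOFS =====

-- Common normal form: the columns emitted from boundary list (prev :: rest), numbered from k.
def pvCore : List Int → Int → List (String × Int × Int)
  | [], _ => []
  | [x], k => [("Column_" ++ PySem.Int.toStr k, x, 10000)]
  | x :: y :: rest, k => ("Column_" ++ PySem.Int.toStr k, x, y) :: pvCore (y :: rest) (k + 1)

lemma B_core (padding : Int) (xs : List Int) :
    ∀ (acc : List (String × Int × Int)) (prev k : Int),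
    (let s := xs.foldl
        (fun (st : List (String × Int × Int) × Int × Int) x =>
          (st.1 ++ [("Column_" ++ PySem.Int.toStr st.2.2, st.2.1, x + padding)],
           x + padding, st.2.2 + 1))
        (acc, prev, k)
     s.1 ++ [("Column_" ++ PySem.Int.toStr s.2.2, s.2.1, 10000)])
    = acc ++ pvCore (prev :: xs.map (fun x => x + padding)) k := by
  induction xs with
  | nil => intro acc prev k; simp [pvCore]
  | cons y ys ih =>
      intro acc prev k
      simp only [List.foldl_cons, List.map_cons]
      rw [ih (acc ++ [("Column_" ++ PySem.Int.toStr k, prev, y + padding)]) (y + padding) (k + 1)]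
      simp [pvCore]

lemma A_core (xs : List Int) : ∀ (x : Int) (k : Int),
    (PySem.List.pyRange 0 (((x :: xs).length : Int) - 1) 1).map
      (fun i => ("Column_" ++ PySem.Int.toStr (i + k),
                 PySem.List.pyGetD (x :: xs) i 0,
                 PySem.List.pyGetD (x :: xs) (i + 1) 0))
    ++ [("Column_" ++ PySem.Int.toStr (((x :: xs).length : Int) - 1 + k),
         PySem.List.pyGetD (x :: xs) (-1) 0, 10000)]
    = pvCore (x :: xs) k := by
  induction xs with
  | nil =>
      intro x k
      have h : PySem.List.pyRange 0 (((x :: ([]:List Int)).length : Int) - 1) 1 = [] :=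
        PySem.List.pyRange_one_eq_nil (by simp)
      rw [h, PySem.List.pyGetD_neg_one [x] 0 (by simp)]
      simp [pvCore]
  | cons y ys ih =>
      intro x k
      have hlen : (((x :: y :: ys).length : Int) - 1) = ((y :: ys).length : Int) := by
        simp only [List.length_cons]; push_cast; ring
      rw [hlen]
      have hpos : (0:Int) < ((y :: ys).length : Int) := by
        simp only [List.length_cons]; push_cast; omega
      rw [PySem.List.pyRange_one_cons hpos]
      have hshift : PySem.List.pyRange 1 ((y :: ys).length : Int) 1
          = (PySem.List.pyRange 0 (((y :: ys).length : Int) - 1) 1).map (fun j => j + 1) := by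
        rw [PySem.List.pyRange_one, PySem.List.pyRange_one, List.map_map]
        rw [show ((y :: ys).length : Int) - 1 - 0 = ((y :: ys).length : Int) - 1 by ring]
        refine List.map_congr_left ?_
        intro j _
        simp only [Function.comp_apply]
        ring
      rw [show (0:Int) + 1 = 1 by ring, hshift]
      simp only [List.map_cons, List.map_map]
      have hmapeq :
          ((PySem.List.pyRange 0 (((y :: ys).length : Int) - 1) 1).map
            ((fun i => ("Column_" ++ PySem.Int.toStr (i + k),
                 PySem.List.pyGetD (x :: y :: ys) i 0,
                 PySem.List.pyGetD (x :: y :: ys) (i + 1) 0)) ∘ (fun j => j + 1)))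
          = (PySem.List.pyRange 0 (((y :: ys).length : Int) - 1) 1).map
              (fun i => ("Column_" ++ PySem.Int.toStr (i + (k + 1)),
                 PySem.List.pyGetD (y :: ys) i 0,
                 PySem.List.pyGetD (y :: ys) (i + 1) 0)) := by
        refine List.map_congr_left ?_
        intro j hj
        obtain ⟨hj0, hjlt⟩ := PySem.List.mem_pyRange_one.mp hj
        obtain ⟨m, rfl⟩ := Int.eq_ofNat_of_zero_le hj0
        simp only [Function.comp_apply]
        rw [show ((m:Int) + 1 + k) = (m:Int) + (k + 1) by ring]
        rw [show ((m:Int) + 1 + 1) = (((m + 2 : Nat)) : Int) by push_cast; ring]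
        rw [show ((m:Int) + 1) = (((m + 1 : Nat)) : Int) by push_cast; ring]
        simp only [PySem.List.pyGetD_natCast]
        simp
      rw [hmapeq]
      have hlast : PySem.List.pyGetD (x :: y :: ys) (-1) 0 = PySem.List.pyGetD (y :: ys) (-1) 0 := by
        rw [PySem.List.pyGetD_neg_one (x :: y :: ys) 0 (by simp),
            PySem.List.pyGetD_neg_one (y :: ys) 0 (by simp)]
        simp [List.getLast_cons]
      have hzero : PySem.List.pyGetD (x :: y :: ys) 0 0 = x := PySem.List.pyGetD_zero_cons ..
      have hone : PySem.List.pyGetD (x :: y :: ys) (0 + 1) 0 = y := by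
        rw [show ((0:Int) + 1) = (((1:Nat)):Int) by simp, PySem.List.pyGetD_natCast]
        rfl
      rw [hlast, hzero, hone]
      show _ = pvCore (x :: y :: ys) k
      simp only [pvCore]
      rw [List.cons_append]
      rw [show (0:Int) + k = k by ring]
      rw [show ((y :: ys).length : Int) + k = ((y :: ys).length : Int) - 1 + (k + 1) by ring]
      exact congrArg _ (ih y (k + 1))

-- ===== VERDICT (by name: the statement is the Claim_ definition above) =====
theorem create_column_definitions_spec : Claim_equal_create_column_definitions := by
  intro column_lines padding _
  unfold Spec_create_column_definitions
  have hB := B_core padding column_lines [] 0 0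
  cases column_lines with
  | nil =>
      show create_column_definitions [] padding = create_column_definitions_alt [] padding
      simp [create_column_definitions, create_column_definitions_alt]
      decide
  | cons c cs =>
      unfold create_column_definitions create_column_definitions_alt
      simp only [if_neg (by simp : ¬(c :: cs = []))]
      rw [PySem.List.foldl_append_singleton_eq_map]
      simp only [List.map_cons]
      rw [show (((c + padding) :: cs.map (fun x => x + padding)).length : Int)
            = (((c + padding) :: cs.map (fun x => x + padding)).length : Int) - 1 + 1 by ring]
      rw [show (((c + padding) :: cs.map (fun x => x + padding)).length : Int) - 1 + 1 - 1
            = (((c + padding) :: cs.map (fun x => x + padding)).length : Int) - 1 by ring]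
      rw [List.append_assoc]
      rw [A_core (cs.map (fun x => x + padding)) (c + padding) 1]
      rw [PySem.List.pyGetD_zero_cons]
      simp only at hB
      rw [hB]
      simp [pvCore]
      decide
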